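-- pv_equiv track=rewrite | github.com/NguyenHoangLongAI/chatbotAI_VTC | RAG_Core/RAG_Core/utils/context_processor.py | _is_english_only
-- ===== SOURCE A (Python) =====
-- def _is_english_only(text: str) -> bool:
--     """
--     Check if text is primarily English
--     """
--     # Common English words that shouldn't appear in Vietnamese context
--     english_words = [
--         'the', 'is', 'are', 'was', 'were', 'have', 'has', 'had',
--         'about', 'more', 'details', 'user', 'wants', 'digital',
--         'transformation', 'platforms', 'enterprises', 'for'
--     ]
--
--     text_lower = text.lower()
--     english_count = sum(1 for word in english_words if f' {word} ' in f' {text_lower} ')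
--
--     # If contains 3+ common English words, likely English
--     return english_count >= 3
-- ===== SOURCE B (Python) =====
-- _ENGLISH_WORDS = frozenset([
--     'the', 'is', 'are', 'was', 'were', 'have', 'has', 'had',
--     'about', 'more', 'details', 'user', 'wants', 'digital',
--     'transformation', 'platforms', 'enterprises', 'for'
-- ])
--
--
-- def _is_english_only(text: str) -> bool:
--     """
--     Check if text is primarily English
--     """
--     seen = []
--     for token in text.lower().split(' '):
--         if token in _ENGLISH_WORDS and token not in seen:
--             seen.append(token)
--             if len(seen) == 3:
--                 return True
--     return False
-- ===== Notes on version B (the rewrite author's own statement) =====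
-- stated objective: alternative
-- what changed: Instead of scanning the whole padded text once per dictionary word, B tokenizes the lowercased text once by splitting on the space character and makes a single pass over the tokens, accumulating distinct dictionary hits in a seen-list and returning True as soon as the third distinct English word is found (inverted traversal: over text tokens with early exit, not over the word list).
import Mathlib
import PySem

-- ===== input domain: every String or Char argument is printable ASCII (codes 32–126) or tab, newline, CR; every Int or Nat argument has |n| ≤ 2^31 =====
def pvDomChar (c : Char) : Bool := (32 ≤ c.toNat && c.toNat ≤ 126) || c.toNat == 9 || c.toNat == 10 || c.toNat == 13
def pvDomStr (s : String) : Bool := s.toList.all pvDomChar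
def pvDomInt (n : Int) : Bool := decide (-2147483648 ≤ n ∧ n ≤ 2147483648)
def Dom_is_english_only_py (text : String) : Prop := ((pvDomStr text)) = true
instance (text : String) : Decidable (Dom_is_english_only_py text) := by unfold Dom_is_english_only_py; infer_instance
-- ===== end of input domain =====

-- B replaces A's per-word padded-substring scan of the text by one split(' ') tokenization
-- followed by a single pass over the tokens that accumulates distinct dictionary hits and
-- returns true as soon as the third one appears (alternative traversal with early exit).

-- ===== PORT A =====
def pvEnglishWords : List (List Char) :=
  ["the".toList, "is".toList, "are".toList, "was".toList, "were".toList, "have".toList,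
   "has".toList, "had".toList, "about".toList, "more".toList, "details".toList, "user".toList,
   "wants".toList, "digital".toList, "transformation".toList, "platforms".toList,
   "enterprises".toList, "for".toList]

def is_english_only_py (text : String) : Bool :=
  let text_lower := PySem.Chars.lower text.toList
  -- english_count = sum(1 for word in english_words if f' {word} ' in f' {text_lower} ')
  let english_count : Int :=
    pvEnglishWords.foldl
      (fun acc word =>
        if PySem.Chars.isIn (' ' :: (word ++ [' '])) (' ' :: (text_lower ++ [' '])) then acc + 1
        else acc) 0
  decide (3 ≤ english_count)

-- ===== PORT B =====
def pvEnglishSet : PySem.Set (List Char) :=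
  PySem.Set.ofList
    ["the".toList, "is".toList, "are".toList, "was".toList, "were".toList, "have".toList,
     "has".toList, "had".toList, "about".toList, "more".toList, "details".toList, "user".toList,
     "wants".toList, "digital".toList, "transformation".toList, "platforms".toList,
     "enterprises".toList, "for".toList]

-- the for-loop of B: walk the tokens, collect distinct dictionary hits, early-return at 3
def pvBLoop (seen : List (List Char)) : List (List Char) → Bool
  | [] => false
  | token :: rest =>
    if PySem.Set.contains pvEnglishSet token && !(seen.contains token) then
      let seen' := seen ++ [token]
      if seen'.length == 3 then true else pvBLoop seen' rest
    else pvBLoop seen rest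

def is_english_only_py_alt (text : String) : Bool :=
  pvBLoop [] (PySem.Chars.splitOn (PySem.Chars.lower text.toList) [' '])

-- ===== PRECONDITION & SPEC =====
def Spec_is_english_only_py (text : String) (out : Bool) : Prop := out = is_english_only_py_alt text
instance (text : String) (out : Bool) : Decidable (Spec_is_english_only_py text out) := by unfold Spec_is_english_only_py; infer_instance

-- ===== CLAIM (what is proved, stated in full; the proofs are below) =====
def Claim_equal_is_english_only_py : Prop := ∀ (text : String), Dom_is_english_only_py text → Spec_is_english_only_py text (is_english_only_py text)

-- ===== LEMMAS AND PROOFS =====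

-- proof-side structural single-space splitter
def pvSplit : List Char → List (List Char)
  | [] => [[]]
  | x :: r => if x = ' ' then [] :: pvSplit r else (pvSplit r).modifyHead (x :: ·)

theorem pvSplit_ne_nil (s : List Char) : pvSplit s ≠ [] := by
  induction s with
  | nil => simp [pvSplit]
  | cons x r ih =>
    simp only [pvSplit]
    split_ifs
    · simp
    · cases h : pvSplit r with
      | nil => exact absurd h ih
      | cons a t => simp [List.modifyHead]

theorem pvGo_eq (l : List Char) : ∀ (fuel : Nat) (cur : List Char) (acc : List (List Char)),
    l.length ≤ fuel →
    PySem.Chars.splitOn.go [' '] fuel l cur acc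
      = acc.reverse ++ (pvSplit l).modifyHead (cur.reverse ++ ·) := by
  induction l with
  | nil =>
    intro fuel cur acc _
    cases fuel <;> simp [PySem.Chars.splitOn.go, pvSplit]
  | cons c r ih =>
    intro fuel cur acc hlen
    cases fuel with
    | zero => simp at hlen
    | succ m =>
      rw [PySem.Chars.splitOn.go]
      by_cases hc : c = ' '
      · subst hc
        rw [if_pos (by simp [List.isPrefixOf])]
        simp only [List.length_singleton, List.drop_succ_cons, List.drop_zero]
        rw [ih m [] (cur.reverse :: acc) (by simp at hlen; omega)]
        cases hsp : pvSplit r <;> simp [pvSplit, hsp, List.modifyHead]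
      · rw [if_neg (by simp [List.isPrefixOf]; exact fun h => hc h.symm)]
        rw [ih m (c :: cur) acc (by simp at hlen; omega)]
        obtain ⟨h, t, hht⟩ : ∃ h t, pvSplit r = h :: t := by
          cases hsp : pvSplit r with
          | nil => exact absurd hsp (pvSplit_ne_nil r)
          | cons h t => exact ⟨h, t, rfl⟩
        simp [pvSplit, hc, hht, List.modifyHead]

theorem pvSplitOn_eq (s : List Char) : PySem.Chars.splitOn s [' '] = pvSplit s := by
  rw [PySem.Chars.splitOn, pvGo_eq s (s.length + 1) [] [] (by omega)]
  cases h : pvSplit s with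
  | nil => exact absurd h (pvSplit_ne_nil s)
  | cons a t => simp [List.modifyHead]

-- w++[' '] is a prefix of s iff w is the first of at least two tokens
theorem pvPrefix_iff (w : List Char) (hw : ' ' ∉ w) : ∀ (s : List Char),
    (w ++ [' '] <+: s) ↔ ∃ tl, pvSplit s = w :: tl ∧ tl ≠ [] := by
  induction w with
  | nil =>
    intro s
    cases s with
    | nil => simp [pvSplit]
    | cons x r =>
      by_cases hx : x = ' '
      · subst hx
        simp [pvSplit, List.cons_prefix_cons, pvSplit_ne_nil r]
      · simp only [pvSplit, if_neg hx]
        constructor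
        · intro h
          simp [List.cons_prefix_cons] at h
          exact absurd h.symm hx
        · rintro ⟨tl, htl, -⟩
          obtain ⟨h, t, hht⟩ : ∃ h t, pvSplit r = h :: t := by
            cases hsp : pvSplit r with
            | nil => exact absurd hsp (pvSplit_ne_nil r)
            | cons h t => exact ⟨h, t, rfl⟩
          rw [hht] at htl
          simp [List.modifyHead] at htl
  | cons a w' ih =>
    intro s
    have ha : a ≠ ' ' := fun h => hw (h ▸ List.mem_cons_self)
    have hw' : ' ' ∉ w' := fun h => hw (List.mem_cons_of_mem a h)
    cases s with
    | nil => simp [pvSplit]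
    | cons x r =>
      constructor
      · intro h
        rw [List.cons_append, List.cons_prefix_cons] at h
        obtain ⟨rfl, hpre⟩ := h
        obtain ⟨tl, htl, htlne⟩ := (ih hw' r).mp hpre
        refine ⟨tl, ?_, htlne⟩
        simp [pvSplit, ha, htl, List.modifyHead]
      · rintro ⟨tl, htl, htlne⟩
        by_cases hx : x = ' '
        · subst hx; simp [pvSplit] at htl
        · simp only [pvSplit, if_neg hx] at htl
          obtain ⟨h, t, hht⟩ : ∃ h t, pvSplit r = h :: t := by
            cases hsp : pvSplit r with
            | nil => exact absurd hsp (pvSplit_ne_nil r)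
            | cons h t => exact ⟨h, t, rfl⟩
          rw [hht] at htl
          simp [List.modifyHead] at htl
          obtain ⟨⟨rfl, rfl⟩, rfl⟩ := htl
          rw [List.cons_append, List.cons_prefix_cons]
          exact ⟨rfl, (ih hw' r).mpr ⟨t, hht, htlne⟩⟩

-- master: padded-substring ↔ membership among the interior tokens
theorem pvMaster (w : List Char) (hw : ' ' ∉ w) : ∀ (s : List Char),
    ((' ' :: (w ++ [' '])) <:+: s) ↔ w ∈ ((pvSplit s).tail).dropLast := by
  intro s
  induction s with
  | nil => simp [pvSplit]
  | cons x r ih =>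
    rw [List.infix_cons_iff]
    by_cases hx : x = ' '
    · subst hx
      rw [List.cons_prefix_cons]
      simp only [pvSplit, true_and]
      rw [pvPrefix_iff w hw r, ih]
      obtain ⟨h, t, hht⟩ : ∃ h t, pvSplit r = h :: t := by
        cases hsp : pvSplit r with
        | nil => exact absurd hsp (pvSplit_ne_nil r)
        | cons h t => exact ⟨h, t, rfl⟩
      rw [hht]
      cases t with
      | nil => simp
      | cons t1 ts => simp [List.dropLast_cons_of_ne_nil]; tauto
    · have hnp : ¬ (' ' :: (w ++ [' ']) <+: x :: r) := by
        rw [List.cons_prefix_cons]; rintro ⟨h, -⟩; exact hx h.symm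
      simp only [hnp, false_or]
      rw [ih]
      obtain ⟨h, t, hht⟩ : ∃ h t, pvSplit r = h :: t := by
        cases hsp : pvSplit r with
        | nil => exact absurd hsp (pvSplit_ne_nil r)
        | cons h t => exact ⟨h, t, rfl⟩
      simp [pvSplit, hx, hht, List.modifyHead]

theorem pvSplit_concat_space (u : List Char) : pvSplit (u ++ [' ']) = pvSplit u ++ [[]] := by
  induction u with
  | nil => simp [pvSplit]
  | cons x r ih =>
    by_cases hx : x = ' '
    · subst hx; simp [pvSplit, ih]
    · obtain ⟨h, t, hht⟩ : ∃ h t, pvSplit r = h :: t := by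
        cases hsp : pvSplit r with
        | nil => exact absurd hsp (pvSplit_ne_nil r)
        | cons h t => exact ⟨h, t, rfl⟩
      simp [pvSplit, hx, hht, ih, List.modifyHead]

-- per-word bridge on the padded text
theorem pvWord_iff (w u : List Char) (hw : ' ' ∉ w) :
    PySem.Chars.isIn (' ' :: (w ++ [' '])) (' ' :: (u ++ [' '])) = true ↔ w ∈ pvSplit u := by
  rw [PySem.Chars.isIn_iff_infix, pvMaster w hw (' ' :: (u ++ [' ']))]
  simp [pvSplit, pvSplit_concat_space u]

theorem pvEnglishSet_eq : pvEnglishSet = pvEnglishWords := by decide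

theorem pvNoSpace : ∀ w ∈ pvEnglishWords, ' ' ∉ w := by decide

theorem pvWordsNodup : pvEnglishWords.Nodup := by decide

-- counting dictionary words lying in a nodup sublist of the dictionary gives its length
theorem pvCount_seen (seen : List (List Char)) (hnd : seen.Nodup)
    (hsub : seen ⊆ pvEnglishWords) :
    pvEnglishWords.countP (fun w => decide (w ∈ seen)) = seen.length := by
  rw [List.countP_eq_length_filter]
  apply le_antisymm
  · exact ((List.Nodup.filter _ pvWordsNodup).subperm
      (fun x hx => (List.mem_filter.mp hx).2 |> (by simpa using ·))).length_le
  · exact (hnd.subperm (fun x hx => List.mem_filter.mpr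
      ⟨hsub hx, by simpa using hx⟩)).length_le

-- the loop of B counts distinct dictionary words occurring in seen or the remaining tokens
theorem pvBLoop_eq (ts : List (List Char)) : ∀ (seen : List (List Char)),
    seen.Nodup → seen ⊆ pvEnglishWords → seen.length < 3 →
    pvBLoop seen ts
      = decide (3 ≤ pvEnglishWords.countP (fun w => decide (w ∈ seen ∨ w ∈ ts))) := by
  induction ts with
  | nil =>
    intro seen hnd hsub hlt
    have h : pvEnglishWords.countP
        (fun w => decide (w ∈ seen ∨ w ∈ ([] : List (List Char)))) = seen.length := by
      rw [← pvCount_seen seen hnd hsub]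
      exact List.countP_congr (fun w _ => by simp)
    rw [pvBLoop, h]
    symm
    rw [decide_eq_false_iff_not]
    omega
  | cons t rest ih =>
    intro seen hnd hsub hlt
    rw [pvBLoop]
    by_cases hmem : t ∈ pvEnglishWords ∧ t ∉ seen
    · have hc : (PySem.Set.contains pvEnglishSet t && !(seen.contains t)) = true := by
        rw [pvEnglishSet_eq]
        simp [PySem.Set.contains, hmem.1, hmem.2]
      rw [if_pos hc]
      have hnd' : (seen ++ [t]).Nodup := by
        simp [List.nodup_append, hnd]
        intro a ha h
        exact hmem.2 (h ▸ ha)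
      have hsub' : (seen ++ [t]) ⊆ pvEnglishWords := by
        intro x hx
        rcases List.mem_append.mp hx with h | h
        · exact hsub h
        · simp at h; exact h ▸ hmem.1
      have hcc : pvEnglishWords.countP (fun w => decide (w ∈ seen ++ [t] ∨ w ∈ rest))
          = pvEnglishWords.countP (fun w => decide (w ∈ seen ∨ w ∈ t :: rest)) := by
        apply List.countP_congr
        intro w _
        simp only [decide_eq_true_eq, List.mem_append, List.mem_cons]
        tauto
      by_cases h3 : (seen ++ [t]).length = 3
      · rw [if_pos (by simpa using h3)]
        have hge : 3 ≤ pvEnglishWords.countP (fun w => decide (w ∈ seen ∨ w ∈ t :: rest)) := by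
          have hle := List.countP_mono_left
            (p := fun w => decide (w ∈ seen ++ [t]))
            (q := fun w => decide (w ∈ seen ∨ w ∈ t :: rest))
            (l := pvEnglishWords)
            (fun w hw hwp => by
              simp at hwp ⊢
              rcases hwp with h | h
              · exact Or.inl h
              · exact Or.inr (Or.inl h))
          rw [pvCount_seen _ hnd' hsub', h3] at hle
          exact hle
        exact (decide_eq_true hge).symm
      · rw [if_neg (by simpa using h3)]
        rw [ih (seen ++ [t]) hnd' hsub' (by simp at h3 ⊢; omega), hcc]
    · have hc : (PySem.Set.contains pvEnglishSet t && !(seen.contains t)) = false := by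
        simp [PySem.Set.contains]
        intro h
        rcases not_and_or.mp hmem with h' | h'
        · exact absurd (by rw [pvEnglishSet_eq] at h; exact h) h'
        · exact not_not.mp h'
      rw [if_neg (by simp only [hc]; exact Bool.false_ne_true)]
      rw [ih seen hnd hsub hlt]
      have hcc : pvEnglishWords.countP (fun w => decide (w ∈ seen ∨ w ∈ rest))
          = pvEnglishWords.countP (fun w => decide (w ∈ seen ∨ w ∈ t :: rest)) := by
        apply List.countP_congr
        intro w hw
        simp only [decide_eq_true_eq, List.mem_cons]
        constructor
        · rintro (h | h)
          · exact Or.inl h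
          · exact Or.inr (Or.inr h)
        · rintro (h | rfl | h)
          · exact Or.inl h
          · rcases not_and_or.mp hmem with h' | h'
            · exact absurd hw h'
            · exact Or.inl (not_not.mp h')
          · exact Or.inr h
      rw [hcc]

-- ===== VERDICT (by name: the statement is the Claim_ definition above) =====
theorem is_english_only_py_spec : Claim_equal_is_english_only_py := by
  intro text _
  unfold Spec_is_english_only_py
  simp only [is_english_only_py, is_english_only_py_alt]
  rw [PySem.List.foldl_if_add_one
    (fun word => PySem.Chars.isIn (' ' :: (word ++ [' ']))
      (' ' :: (PySem.Chars.lower text.toList ++ [' '])))  pvEnglishWords 0]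
  set u := PySem.Chars.lower text.toList with hu
  rw [pvSplitOn_eq, pvBLoop_eq (pvSplit u) [] (by simp) (by simp) (by simp)]
  have hcount : pvEnglishWords.countP
      (fun word => PySem.Chars.isIn (' ' :: (word ++ [' '])) (' ' :: (u ++ [' '])))
      = pvEnglishWords.countP (fun w => decide (w ∈ ([] : List (List Char)) ∨ w ∈ pvSplit u)) := by
    apply List.countP_congr
    intro w hwmem
    rw [decide_eq_true_iff]
    rw [pvWord_iff w u (pvNoSpace w hwmem)]
    simp
  rw [hcount]
  rw [decide_eq_decide]
  omega
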